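-- pv_equiv track=rewrite | github.com/x4dr/GamePack | gamepack/NewDice.py | drop_n
-- ===== SOURCE A (Python) =====
-- from typing import Optional, Tuple, List, Union, Self
--
-- def drop_n(x: List[int], n: int) -> List[int]:
--     if not n:
--         return x
--
--     # if n is positive, drop smallest
--     # if n is negative, drop largest
--
--     indices_to_drop = []
--     temp = list(enumerate(x))
--     if n > 0:
--         # drop n smallest
--         temp.sort(key=lambda e: e[1])
--         indices_to_drop = [e[0] for e in temp[:n]]
--     else:
--         # drop abs(n) largest
--         temp.sort(key=lambda e: e[1], reverse=True)
--         indices_to_drop = [e[0] for e in temp[: abs(n)]]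
--
--     indices_to_drop.sort(reverse=True)
--     for idx in indices_to_drop:
--         del x[idx]
--
--     return x
-- ===== SOURCE B (Python) =====
-- from typing import List
--
--
-- def drop_n(x: List[int], n: int) -> List[int]:
--     # Rank-counting: element i survives iff at least abs(n) other positions
--     # precede it in the stable order (value, then original index).
--     # Mutates x in place (x[:] = keep), like A.
--     if not n:
--         return x
--     k = abs(n)
--     keep = []
--     for i, v in enumerate(x):
--         if n > 0:
--             r = sum(1 for j, w in enumerate(x) if w < v or (w == v and j < i))
--         else:
--             r = sum(1 for j, w in enumerate(x) if w > v or (w == v and j < i))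
--         if r >= k:
--             keep.append(v)
--     x[:] = keep
--     return x
-- ===== Notes on version B (the rewrite author's own statement) =====
-- stated objective: alternative
-- what changed: B replaces A's stable sort of (index,value) pairs plus descending index-deletion loop by a direct rank computation: an element survives iff at least |n| positions strictly precede it in the stable (value, original-index) order, done as one filtering pass with a counting scan per element.
import Mathlib
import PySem

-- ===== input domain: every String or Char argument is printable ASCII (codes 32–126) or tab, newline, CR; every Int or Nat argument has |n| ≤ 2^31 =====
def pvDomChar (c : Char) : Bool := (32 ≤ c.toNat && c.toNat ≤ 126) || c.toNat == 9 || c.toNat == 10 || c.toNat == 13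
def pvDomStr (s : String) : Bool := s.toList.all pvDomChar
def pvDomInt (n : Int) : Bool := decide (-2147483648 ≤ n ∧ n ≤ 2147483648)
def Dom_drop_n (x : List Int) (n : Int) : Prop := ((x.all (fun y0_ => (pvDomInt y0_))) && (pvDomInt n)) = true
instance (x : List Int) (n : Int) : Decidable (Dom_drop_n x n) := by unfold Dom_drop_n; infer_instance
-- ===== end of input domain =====

-- B drops the n smallest (n>0) / |n| largest (n<0) by counting, for each element, how many
-- positions strictly precede it in the stable (value, original index) order, instead of A's
-- sort + index-deletion loop.  Both A and B mutate the Python argument in place; the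
-- equivalence proved here is about the RETURN value.

-- ===== PORT A =====
-- `del x[idx]` with idx a valid non-negative index is List.eraseIdx idx.toNat (exact here:
-- every deleted index comes from enumerate(x) and indices are deleted in descending order,
-- so each is in range when deleted).
def drop_n (x : List Int) (n : Int) : List Int :=
  if n == 0 then x
  else
    let temp := PySem.List.enumerate x
    let indices_to_drop :=
      if n > 0 then
        (PySem.List.slice (PySem.List.sorted temp (fun e => e.2)) none (some n)).map (fun e => e.1)
      else
        (PySem.List.slice (PySem.List.sorted temp (fun e => e.2) true) none (some (n.natAbs : Int))).map (fun e => e.1)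
    let itd := PySem.List.sorted indices_to_drop (fun i => i) true
    itd.foldl (fun acc idx => acc.eraseIdx idx.toNat) x

-- ===== PORT B =====
def drop_n_alt (x : List Int) (n : Int) : List Int :=
  if n == 0 then x
  else
    (PySem.List.enumerate x).foldl
      (fun keep e =>
        let r :=
          if n > 0 then
            ((PySem.List.enumerate x).filter (fun b => b.2 < e.2 || (b.2 == e.2 && b.1 < e.1))).length
          else
            ((PySem.List.enumerate x).filter (fun b => b.2 > e.2 || (b.2 == e.2 && b.1 < e.1))).length
        if n.natAbs ≤ r then keep ++ [e.2] else keep) []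

-- ===== PRECONDITION & SPEC =====
def Spec_drop_n (x : List Int) (n : Int) (out : List Int) : Prop := out = drop_n_alt x n
instance (x : List Int) (n : Int) (out : List Int) : Decidable (Spec_drop_n x n out) := by unfold Spec_drop_n; infer_instance

-- ===== CLAIM (what is proved, stated in full; the proofs are below) =====
def Claim_equal_drop_n : Prop := ∀ (x : List Int) (n : Int), Dom_drop_n x n → Spec_drop_n x n (drop_n x n)

-- ===== LEMMAS AND PROOFS =====

-- "b strictly precedes a-ties-broken-by-index": value comparison vcmp, then index.
def pvPr (vcmp : Int → Int → Bool) (a b : Int × Int) : Bool :=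
  vcmp a.2 b.2 || (a.2 == b.2 && a.1 < b.1)

theorem vcmp_irrefl (vcmp : Int → Int → Bool) (hasym : ∀ a b, vcmp a b → ¬ vcmp b a = true)
    (a : Int) : vcmp a a = false := by
  by_cases h : vcmp a a = true
  · exact absurd h (hasym _ _ h)
  · simpa using h

theorem pvPr_irrefl (vcmp : Int → Int → Bool) (hasym : ∀ a b, vcmp a b → ¬ vcmp b a = true)
    (a : Int × Int) : pvPr vcmp a a = false := by
  simp [pvPr, vcmp_irrefl vcmp hasym]

theorem pvPr_asymm (vcmp : Int → Int → Bool) (hasym : ∀ a b, vcmp a b → ¬ vcmp b a = true)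
    (a b : Int × Int) (h1 : pvPr vcmp a b = true) (h2 : pvPr vcmp b a = true) : False := by
  simp [pvPr] at h1 h2
  rcases h1 with h1 | ⟨he1, hi1⟩ <;> rcases h2 with h2 | ⟨he2, hi2⟩
  · exact (hasym _ _ h1) h2
  · rw [he2] at h1; exact (hasym _ _ h1) h1
  · rw [he1] at h2; exact (hasym _ _ h2) h2
  · omega

-- insertBy with a strictly later index keeps the stable order pvPr.
theorem insertBy_pairwise_pvPr (vcmp : Int → Int → Bool)
    (htrans : ∀ a b c, vcmp a b → vcmp b c → vcmp a c = true)
    (htri : ∀ a b : Int, a ≠ b → vcmp a b ∨ vcmp b a)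
    (e : Int × Int) (acc : List (Int × Int))
    (hacc : acc.Pairwise (fun a b => pvPr vcmp a b = true))
    (hidx : ∀ a ∈ acc, a.1 < e.1) :
    (PySem.List.insertBy (fun a b => vcmp a.2 b.2) e acc).Pairwise (fun a b => pvPr vcmp a b = true) := by
  induction acc with
  | nil => simp [PySem.List.insertBy]
  | cons y ys ih =>
    rw [List.pairwise_cons] at hacc
    obtain ⟨hy, hys⟩ := hacc
    by_cases hb : vcmp e.2 y.2 = true
    · rw [PySem.List.insertBy, if_pos hb]
      refine List.Pairwise.cons ?_ (List.Pairwise.cons hy hys)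
      intro z hz
      rw [List.mem_cons] at hz
      rcases hz with rfl | hz
      · simp [pvPr, hb]
      · have hyz := hy z hz
        simp only [pvPr, Bool.or_eq_true, Bool.and_eq_true, beq_iff_eq, decide_eq_true_eq] at hyz ⊢
        rcases hyz with h | ⟨he, _⟩
        · exact Or.inl (htrans _ _ _ hb h)
        · exact Or.inl (he ▸ hb)
    · rw [PySem.List.insertBy, if_neg hb]
      refine List.Pairwise.cons ?_ (ih hys (fun a ha => hidx a (List.mem_cons_of_mem _ ha)))
      intro z hz
      rw [PySem.List.mem_insertBy] at hz
      rcases hz with rfl | hz2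
      · -- pvPr y z (z is the newly inserted e)
        by_cases hv : y.2 = z.2
        · simp [pvPr, hv, hidx y (List.mem_cons_self)]
        · rcases htri y.2 z.2 hv with h | h
          · simp [pvPr, h]
          · exact absurd h (by simpa using hb)
      · exact hy z hz2

theorem foldl_insertBy_pairwise_pvPr (vcmp : Int → Int → Bool)
    (htrans : ∀ a b c, vcmp a b → vcmp b c → vcmp a c = true)
    (htri : ∀ a b : Int, a ≠ b → vcmp a b ∨ vcmp b a)
    (l acc : List (Int × Int))
    (hacc : acc.Pairwise (fun a b => pvPr vcmp a b = true))
    (hcross : ∀ a ∈ acc, ∀ b ∈ l, a.1 < b.1)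
    (hl : l.Pairwise (fun a b => a.1 < b.1)) :
    (l.foldl (fun acc x => PySem.List.insertBy (fun a b => vcmp a.2 b.2) x acc) acc).Pairwise
      (fun a b => pvPr vcmp a b = true) := by
  induction l generalizing acc with
  | nil => simpa using hacc
  | cons h t ih =>
    rw [List.pairwise_cons] at hl
    rw [List.foldl_cons]
    refine ih _ ?_ ?_ hl.2
    · exact insertBy_pairwise_pvPr vcmp htrans htri h acc hacc
        (fun a ha => hcross a ha h List.mem_cons_self)
    · intro a ha b hb
      rw [PySem.List.mem_insertBy] at ha
      rcases ha with rfl | ha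
      · exact hl.1 b hb
      · exact hcross a ha b (List.mem_cons_of_mem _ hb)

-- membership in the first k of a strictly pvPr-sorted list = rank < k
theorem take_iff_rank {α : Type} (r : α → α → Bool)
    (hirr : ∀ a, r a a = false)
    (hasym : ∀ a b, r a b = true → r b a = true → False)
    (s : List α) (hs : s.Pairwise (fun a b => r a b = true))
    (e : α) (he : e ∈ s) (k : Nat) :
    e ∈ s.take k ↔ (s.filter (fun b => r b e)).length < k := by
  induction s generalizing k with
  | nil => simp at he
  | cons a t ih =>
    rw [List.pairwise_cons] at hs
    by_cases hea : e = a
    · subst hea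
      have hnt : e ∉ t := fun h => by
        have := hs.1 e h
        rw [hirr e] at this
        exact Bool.false_ne_true this
      have h1 : (List.filter (fun b => r b e) (e :: t)).length = 0 := by
        rw [List.filter_cons]
        simp only [hirr e, Bool.false_eq_true, if_false]
        rw [List.length_eq_zero_iff, List.filter_eq_nil_iff]
        intro b hb
        simp only [Bool.not_eq_true]
        by_contra hr
        exact hasym e b (hs.1 b hb) (by simpa using hr)
      rw [h1]
      cases k with
      | zero => simp
      | succ k => simp
    · have het : e ∈ t := by
        rw [List.mem_cons] at he
        rcases he with rfl | h
        · exact absurd rfl hea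
        · exact h
      have hae : r a e = true := hs.1 e het
      have h1 : List.filter (fun b => r b e) (a :: t) = a :: List.filter (fun b => r b e) t := by
        rw [List.filter_cons, if_pos (by simpa using hae)]
      rw [h1]
      cases k with
      | zero => simp
      | succ k =>
        rw [List.take_succ_cons, List.length_cons]
        constructor
        · intro h
          rw [List.mem_cons] at h
          rcases h with rfl | h
          · exact absurd rfl hea
          · have := (ih hs.2 het k).mp h; omega
        · intro h
          exact List.mem_cons_of_mem _ ((ih hs.2 het k).mpr (by omega))

-- deleting a strictly descending list of valid indices = filtering them out
theorem foldl_eraseIdx_eq_filter (ds : List Int) (x : List Int)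
    (hds : ds.Pairwise (fun a b => a > b))
    (hrange : ∀ d ∈ ds, 0 ≤ d ∧ d < (x.length : Int)) :
    ds.foldl (fun acc idx => acc.eraseIdx idx.toNat) x
      = (((PySem.List.enumerate x).filter (fun e => !(ds.contains e.1))).map (fun e => e.2)) := by
  induction ds generalizing x with
  | nil => simp [PySem.List.map_snd_enumerate]
  | cons d t ih =>
    rw [List.pairwise_cons] at hds
    obtain ⟨hd0, hdlen⟩ := hrange d List.mem_cons_self
    set dn := d.toNat with hdn
    have hdnx : dn < x.length := by omega
    have hx : x = x.take dn ++ x[dn] :: x.drop (dn + 1) := by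
      conv_lhs => rw [← List.take_append_drop dn x]
      rw [List.drop_eq_getElem_cons hdnx]
    have hx' : x.eraseIdx dn = x.take dn ++ x.drop (dn + 1) := List.eraseIdx_eq_take_drop_succ x dn
    have hlen' : (x.eraseIdx dn).length = x.length - 1 := by
      rw [List.length_eraseIdx_of_lt hdnx]
    rw [List.foldl_cons]
    rw [ih (x.eraseIdx dn) hds.2 ?range]
    case range =>
      intro d' hd'
      obtain ⟨h0, hl⟩ := hrange d' (List.mem_cons_of_mem _ hd')
      have := hds.1 d' hd'
      constructor
      · exact h0
      · rw [hlen']; omega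
    -- now compare the two filtered enumerations
    have htl : (x.take dn).length = dn := List.length_take_of_le (le_of_lt hdnx)
    rw [hx', PySem.List.enumerate_append]
    conv_rhs => rw [hx, PySem.List.enumerate_append]
    rw [htl]
    have hdrop : PySem.List.enumerate (x[dn] :: x.drop (dn + 1)) (0 + (dn : Int))
        = ((0 : Int) + dn, x[dn]) :: PySem.List.enumerate (x.drop (dn + 1)) ((0 : Int) + dn + 1) :=
      PySem.List.enumerate_cons _ _ _
    rw [hdrop, List.filter_append, List.filter_append, List.filter_cons]
    have hddn : ((0 : Int) + dn) = d := by omega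
    have hmemd : (List.contains (d :: t) ((0 : Int) + (dn : Int))) = true := by
      simp [hddn]
    simp only [hmemd, Bool.not_true, Bool.false_eq_true, if_false]
    -- take-part: the two predicates agree (indices there are < d)
    have htake : List.filter (fun e => !(List.contains t e.1)) (PySem.List.enumerate (x.take dn))
        = List.filter (fun e => !(List.contains (d :: t) e.1)) (PySem.List.enumerate (x.take dn)) := by
      apply List.filter_congr
      intro e hemem
      rw [PySem.List.mem_enumerate_iff] at hemem
      obtain ⟨j, hj, rfl⟩ := hemem
      rw [htl] at hj
      have hne : ¬ ((j : Int) = d) := by omega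
      congr 1
      rw [List.contains_eq_any_beq, List.contains_eq_any_beq, List.any_cons]
      simp [hne]
    -- drop-parts: both filters keep everything (indices ≥ d, all of d :: t are ≤ d)
    have hkeep1 : List.filter (fun e => !(List.contains t e.1)) (PySem.List.enumerate (x.drop (dn + 1)) ((0:Int) + dn))
        = PySem.List.enumerate (x.drop (dn + 1)) ((0:Int) + dn) := by
      rw [List.filter_eq_self]
      intro e hemem
      rw [PySem.List.mem_enumerate_iff] at hemem
      obtain ⟨j, hj, rfl⟩ := hemem
      simp only [Bool.not_eq_true', ← Bool.not_eq_true]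
      intro hc
      rw [List.contains_eq_any_beq] at hc
      simp only [List.any_eq_true, beq_iff_eq] at hc
      obtain ⟨d', hd', hdeq⟩ := hc
      have := hds.1 d' hd'
      omega
    have hkeep2 : List.filter (fun e => !(List.contains (d :: t) e.1)) (PySem.List.enumerate (x.drop (dn + 1)) ((0:Int) + dn + 1))
        = PySem.List.enumerate (x.drop (dn + 1)) ((0:Int) + dn + 1) := by
      rw [List.filter_eq_self]
      intro e hemem
      rw [PySem.List.mem_enumerate_iff] at hemem
      obtain ⟨j, hj, rfl⟩ := hemem
      simp only [Bool.not_eq_true', ← Bool.not_eq_true]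
      intro hc
      rw [List.contains_eq_any_beq] at hc
      simp only [List.any_eq_true, beq_iff_eq] at hc
      obtain ⟨d', hd', hdeq⟩ := hc
      rcases List.mem_cons.mp hd' with rfl | hd'
      · omega
      · have := hds.1 d' hd'; omega
    rw [htake, hkeep1, hkeep2, List.map_append, List.map_append,
        PySem.List.map_snd_enumerate, PySem.List.map_snd_enumerate]

-- fst is injective on enumerate x
theorem enumerate_fst_inj (x : List Int) (a b : Int × Int)
    (ha : a ∈ PySem.List.enumerate x) (hb : b ∈ PySem.List.enumerate x) (h : a.1 = b.1) : a = b := by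
  rw [PySem.List.mem_enumerate_iff] at ha hb
  obtain ⟨j, hj, rfl⟩ := ha
  obtain ⟨j', hj', rfl⟩ := hb
  simp only at h
  have : j = j' := by omega
  subst this
  rfl

-- the main per-case engine: A's branch output = B's branch output
theorem drop_case (x : List Int) (k : Nat) (vcmp : Int → Int → Bool)
    (hasym : ∀ a b, vcmp a b → ¬ vcmp b a = true)
    (s : List (Int × Int))
    (hperm : s.Perm (PySem.List.enumerate x))
    (hsort : s.Pairwise (fun a b => pvPr vcmp a b = true)) :
    (PySem.List.sorted ((s.take k).map (fun e => e.1)) (fun i => i) true).foldl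
        (fun acc idx => acc.eraseIdx idx.toNat) x
      = (PySem.List.enumerate x).foldl
          (fun keep e =>
            if k ≤ ((PySem.List.enumerate x).filter (fun b => pvPr vcmp b e)).length
            then keep ++ [e.2] else keep) [] := by
  set temp := PySem.List.enumerate x with htemp
  set D := (s.take k).map (fun e => e.1) with hD
  set itd := PySem.List.sorted D (fun i => i) true with hitd
  -- itd is strictly descending
  have hsnodup : s.Nodup := by
    refine hperm.nodup_iff.mpr ?_
    refine ((PySem.List.pairwise_lt_enumerate x 0).imp ?_)
    intro a b h heq
    rw [heq] at h
    exact lt_irrefl _ h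
  have hDnodup : D.Nodup := by
    refine ((hsnodup.sublist (List.take_sublist k s))).map_on ?_
    intro a ha b hb h
    exact enumerate_fst_inj x a b
      (hperm.mem_iff.mp (List.mem_of_mem_take ha))
      (hperm.mem_iff.mp (List.mem_of_mem_take hb)) h
  have hitdperm : itd.Perm D := PySem.List.sorted_perm D _ true
  have hitdnodup : itd.Nodup := hitdperm.nodup_iff.mpr hDnodup
  have hitddesc : itd.Pairwise (fun a b => a > b) := by
    have h1 : itd.Pairwise (fun a b : Int => b ≤ a) := PySem.List.sorted_pairwise_rev D (fun i => i)
    have h2 : itd.Pairwise (fun a b : Int => a ≠ b) := hitdnodup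
    exact (h1.and h2).imp (fun h => by omega)
  have hitdrange : ∀ d ∈ itd, 0 ≤ d ∧ d < (x.length : Int) := by
    intro d hd
    rw [PySem.List.mem_sorted] at hd
    rw [hD, List.mem_map] at hd
    obtain ⟨e, he, rfl⟩ := hd
    have : e ∈ temp := hperm.mem_iff.mp (List.mem_of_mem_take he)
    rw [htemp, PySem.List.mem_enumerate_iff] at this
    obtain ⟨j, hj, rfl⟩ := this
    simp only
    omega
  rw [foldl_eraseIdx_eq_filter itd x hitddesc hitdrange]
  -- B's fold = filter + map
  have hB : ∀ (l : List (Int × Int)) (acc : List Int),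
      l.foldl (fun keep e =>
          if k ≤ ((temp.filter (fun b => pvPr vcmp b e)).length) then keep ++ [e.2] else keep) acc
        = acc ++ (l.filter (fun e =>
            decide (k ≤ ((temp.filter (fun b => pvPr vcmp b e)).length)))).map (fun e => e.2) := by
    intro l
    induction l with
    | nil => simp
    | cons h t ih =>
      intro acc
      rw [List.foldl_cons, List.filter_cons]
      by_cases hc : k ≤ ((temp.filter (fun b => pvPr vcmp b h)).length)
      · simp only [hc, if_true, decide_true, ih, List.map_cons, List.append_assoc,
          List.singleton_append]
      · simp only [hc, if_false, decide_false, ih, Bool.false_eq_true]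
  rw [hB temp [], List.nil_append]
  congr 1
  apply List.filter_congr
  intro e hemem
  -- e kept by A  ↔  e kept by B
  have hes : e ∈ s := hperm.mem_iff.mpr hemem
  have hrank : (s.filter (fun b => pvPr vcmp b e)).length = (temp.filter (fun b => pvPr vcmp b e)).length :=
    (hperm.filter _).length_eq
  have hirr : ∀ a, pvPr vcmp a a = false := pvPr_irrefl vcmp hasym
  have htk : e ∈ s.take k ↔ (s.filter (fun b => pvPr vcmp b e)).length < k :=
    take_iff_rank (pvPr vcmp) hirr (pvPr_asymm vcmp hasym) s hsort e hes k
  have hmemD : (List.contains itd e.1 = true) ↔ e ∈ s.take k := by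
    rw [hitd]
    constructor
    · intro h
      rw [List.contains_eq_any_beq] at h
      simp only [List.any_eq_true, beq_iff_eq] at h
      obtain ⟨d, hd, hdeq⟩ := h
      rw [PySem.List.mem_sorted, hD, List.mem_map] at hd
      obtain ⟨b, hb, rfl⟩ := hd
      have hbe : b = e := enumerate_fst_inj x b e
        (hperm.mem_iff.mp (List.mem_of_mem_take hb)) hemem hdeq.symm
      rwa [← hbe]
    · intro h
      rw [List.contains_eq_any_beq]
      simp only [List.any_eq_true, beq_iff_eq]
      exact ⟨e.1, by rw [PySem.List.mem_sorted, hD]; exact List.mem_map_of_mem h, rfl⟩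
  have hiff : (List.contains itd e.1 = true) ↔ ((temp.filter (fun b => pvPr vcmp b e)).length < k) := by
    rw [hmemD, htk, hrank]
  by_cases hc : List.contains itd e.1 = true
  · have hlt := hiff.mp hc
    rw [hc]
    simp only [Bool.not_true]
    symm
    rw [decide_eq_false_iff_not]
    omega
  · have h2 : ¬ ((temp.filter (fun b => pvPr vcmp b e)).length < k) := fun hlt => hc (hiff.mpr hlt)
    rw [Bool.not_eq_true] at hc
    rw [hc]
    simp only [Bool.not_false]
    symm
    rw [decide_eq_true_eq]
    omega

-- ===== VERDICT (by name: the statement is the Claim_ definition above) =====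
theorem drop_n_spec : Claim_equal_drop_n := by
  intro x n _
  unfold Spec_drop_n drop_n drop_n_alt
  by_cases h0 : n == 0
  · simp [h0]
  · simp only [h0, Bool.false_eq_true, if_false]
    by_cases hpos : n > 0
    · simp only [hpos, if_true]
      rw [PySem.List.slice_to _ (by omega)]
      have := drop_case x n.toNat (fun a b => decide (a < b))
        (fun a b h => by simp at *; omega)
        (PySem.List.sorted (PySem.List.enumerate x) (fun e => e.2))
        (PySem.List.sorted_perm _ _ _)
        ?sorted
      case sorted =>
        rw [PySem.List.sorted_eq_foldl_insertBy]
        exact foldl_insertBy_pairwise_pvPr _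
          (fun a b c h1 h2 => by simp at *; omega)
          (fun a b h => by rcases lt_or_gt_of_ne h with h' | h' <;> [left; right] <;> simpa)
          (PySem.List.enumerate x) [] (by simp) (by simp) (PySem.List.pairwise_lt_enumerate x 0)
      have hk : n.natAbs = n.toNat := by omega
      rw [hk]
      simpa [pvPr] using this
    · simp only [hpos, if_false]
      have hneg : n < 0 := by
        rcases lt_trichotomy n 0 with h | h | h
        · exact h
        · exact absurd h (by simpa using h0)
        · exact absurd h hpos
      rw [PySem.List.slice_to _ (by positivity)]
      have hk : ((n.natAbs : Int)).toNat = n.natAbs := by omega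
      rw [hk]
      have := drop_case x n.natAbs (fun a b => decide (b < a))
        (fun a b h => by simp at *; omega)
        (PySem.List.sorted (PySem.List.enumerate x) (fun e => e.2) true)
        (PySem.List.sorted_perm _ _ _)
        ?sorted
      case sorted =>
        rw [PySem.List.sorted_rev_eq_foldl_insertBy]
        exact foldl_insertBy_pairwise_pvPr _
          (fun a b c h1 h2 => by simp at *; omega)
          (fun a b h => by rcases lt_or_gt_of_ne h with h' | h' <;> [right; left] <;> simpa)
          (PySem.List.enumerate x) [] (by simp) (by simp) (PySem.List.pairwise_lt_enumerate x 0)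
      simpa [pvPr] using this
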